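-- pv_equiv track=rewrite | github.com/munsie/aoc-2023 | day3/engine.py | get_number_at
-- ===== SOURCE A (Python) =====
-- def get_number_at(s, x, y):
--     if y < 0 or y >= len(s):
--         return 0, x, y
--
--     row = s[y]
--     if x < 0 or x >= len(row):
--         return 0, x, y
--
--     if not row[x].isdigit():
--         return 0, x, y
--
--     # find the bounds of the number
--     start_x = x
--     while True:
--         if start_x == 0 or not row[start_x - 1].isdigit():
--             break
--         start_x -= 1
--
--     end_x = x
--     while True:
--         if end_x == len(row) - 1 or not row[end_x + 1].isdigit():
--             break
--         end_x += 1
--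
--     return int(row[start_x:end_x + 1]), start_x, end_x
-- ===== SOURCE B (Python) =====
-- def get_number_at(s, x, y):
--     if y < 0 or y >= len(s):
--         return 0, x, y
--     row = s[y]
--     if x < 0 or x >= len(row):
--         return 0, x, y
--     if not row[x].isdigit():
--         return 0, x, y
--     # index the row once: collect every maximal digit run as a (start, end) span
--     spans = []
--     start = None
--     for i, c in enumerate(row):
--         if c.isdigit():
--             if start is None:
--                 start = i
--         else:
--             if start is not None:
--                 spans.append((start, i - 1))
--                 start = None
--     if start is not None:
--         spans.append((start, len(row) - 1))
--     for a, b in spans: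
--         if a <= x <= b:
--             return int(row[a:b + 1]), a, b
--     return 0, x, y
-- ===== Notes on version B (the rewrite author's own statement) =====
-- stated objective: alternative
-- what changed: B replaces A's two while-loops that expand outward from x with a single left-to-right pass that indexes the row into maximal digit-run spans and then looks up the span containing x.
import Mathlib
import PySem

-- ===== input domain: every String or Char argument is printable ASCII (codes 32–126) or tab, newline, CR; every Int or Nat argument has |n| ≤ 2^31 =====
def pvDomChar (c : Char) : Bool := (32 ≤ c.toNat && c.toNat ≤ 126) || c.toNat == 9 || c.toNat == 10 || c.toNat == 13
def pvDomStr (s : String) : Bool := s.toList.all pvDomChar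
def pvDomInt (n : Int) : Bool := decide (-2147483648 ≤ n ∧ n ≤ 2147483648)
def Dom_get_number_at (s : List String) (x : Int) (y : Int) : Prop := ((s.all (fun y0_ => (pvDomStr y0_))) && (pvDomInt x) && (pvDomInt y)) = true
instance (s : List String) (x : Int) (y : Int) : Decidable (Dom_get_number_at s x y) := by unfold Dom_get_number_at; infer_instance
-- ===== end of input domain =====

-- B re-indexes the row in one left-to-right pass into maximal digit-run spans and looks up the span
-- containing x, instead of A's two while-loops expanding outward from x (objective: alternative).

-- ===== PORT A =====
-- while-loop 'start_x -= 1': structural recursion on the index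
def pvGoLeft (r : List Char) : Nat → Nat
  | 0 => 0
  | Nat.succ i => if !(PySem.Chars.isdigit (r.getD i ' ')) then i + 1 else pvGoLeft r i

-- while-loop 'end_x += 1'; terminates because a digit at i+1 means i+1 < r.length
def pvGoRight (r : List Char) (i : Nat) : Nat :=
  if i = r.length - 1 || !(PySem.Chars.isdigit (r.getD (i + 1) ' ')) then i
  else pvGoRight r (i + 1)
  termination_by r.length - i
  decreasing_by
    rename_i h
    simp only [Bool.or_eq_true, Bool.not_eq_true', not_or, decide_eq_true_eq] at h
    have h2 : i + 1 < r.length := by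
      by_contra hc
      have : r.getD (i + 1) ' ' = ' ' := List.getD_eq_default _ _ (by omega)
      rw [this] at h
      exact absurd h.2 (by decide)
    omega

def get_number_at (s : List String) (x : Int) (y : Int) : Int × Int × Int :=
  if y < 0 || (s.length : Int) ≤ y then (0, x, y)
  else
    let row := ((PySem.List.pyGet? s y).getD "").toList
    if x < 0 || (row.length : Int) ≤ x then (0, x, y)
    else if !(PySem.Chars.isdigit (PySem.List.pyGetD row x ' ')) then (0, x, y)
    else
      let sx := pvGoLeft row x.toNat
      let ex := pvGoRight row x.toNat
      ((PySem.Int.ofChars? (PySem.List.slice row (some (sx : Int)) (some ((ex : Int) + 1)))).getD 0,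
        (sx : Int), (ex : Int))

-- ===== PORT B =====
-- one pass over enumerate(row): state = (spans so far, start of the open digit run if any)
def pvSpanStep (st : List (Int × Int) × Option Int) (ic : Int × Char) : List (Int × Int) × Option Int :=
  if PySem.Chars.isdigit ic.2 then
    (st.1, if st.2.isNone then some ic.1 else st.2)
  else
    match st.2 with
    | some a => (st.1 ++ [(a, ic.1 - 1)], none)
    | none => (st.1, none)

def pvSpans (r : List Char) : List (Int × Int) :=
  let p := (PySem.List.enumerate r 0).foldl pvSpanStep (([] : List (Int × Int)), (none : Option Int))
  match p.2 with
  | some a => p.1 ++ [(a, (r.length : Int) - 1)]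
  | none => p.1

def get_number_at_alt (s : List String) (x : Int) (y : Int) : Int × Int × Int :=
  if y < 0 || (s.length : Int) ≤ y then (0, x, y)
  else
    let row := ((PySem.List.pyGet? s y).getD "").toList
    if x < 0 || (row.length : Int) ≤ x then (0, x, y)
    else if !(PySem.Chars.isdigit (PySem.List.pyGetD row x ' ')) then (0, x, y)
    else
      match (pvSpans row).find? (fun p => decide (p.1 ≤ x) && decide (x ≤ p.2)) with
      | some (a, b) =>
          ((PySem.Int.ofChars? (PySem.List.slice row (some a) (some (b + 1)))).getD 0, a, b)
      | none => (0, x, y)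

-- ===== PRECONDITION & SPEC =====
def Spec_get_number_at (s : List String) (x : Int) (y : Int) (out : Int × Int × Int) : Prop := out = get_number_at_alt s x y
instance (s : List String) (x : Int) (y : Int) (out : Int × Int × Int) : Decidable (Spec_get_number_at s x y out) := by unfold Spec_get_number_at; infer_instance

-- ===== CLAIM (what is proved, stated in full; the proofs are below) =====
def Claim_equal_get_number_at : Prop := ∀ (s : List String) (x : Int) (y : Int), Dom_get_number_at s x y → Spec_get_number_at s x y (get_number_at s x y)

-- ===== LEMMAS AND PROOFS =====

-- digit test at a Nat index (out of range reads ' ', which is not a digit)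
def pvDig (r : List Char) (j : Nat) : Bool := PySem.Chars.isdigit (r.getD j ' ')

-- a maximal digit run of r
def pvRun (r : List Char) (a b : Nat) : Prop :=
  a ≤ b ∧ b < r.length ∧ (∀ j, a ≤ j → j ≤ b → pvDig r j = true) ∧
    (a = 0 ∨ pvDig r (a - 1) = false) ∧ (b + 1 = r.length ∨ pvDig r (b + 1) = false)

lemma pvDig_oob (r : List Char) (j : Nat) (h : r.length ≤ j) : pvDig r j = false := by
  unfold pvDig
  rw [List.getD_eq_default _ _ (by omega)]
  decide

lemma pvGoLeft_spec (r : List Char) (x : Nat) (hd : pvDig r x = true) :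
    pvGoLeft r x ≤ x ∧ (∀ j, pvGoLeft r x ≤ j → j ≤ x → pvDig r j = true) ∧
      (pvGoLeft r x = 0 ∨ pvDig r (pvGoLeft r x - 1) = false) := by
  induction x with
  | zero =>
      refine ⟨le_refl _, ?_, Or.inl rfl⟩
      intro j h1 h2
      simpa [Nat.le_zero.mp h2] using hd
  | succ i ih =>
      by_cases hdi : pvDig r i = true
      · have hdi' : PySem.Chars.isdigit (r.getD i ' ') = true := hdi
        have hrec : pvGoLeft r (i + 1) = pvGoLeft r i := by
          simp only [pvGoLeft, hdi', Bool.not_true, Bool.false_eq_true, if_false]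
        obtain ⟨h1, h2, h3⟩ := ih hdi
        refine ⟨by omega, ?_, by rwa [hrec]⟩
        intro j hj1 hj2
        rcases Nat.lt_or_ge j (i + 1) with h | h
        · exact h2 j (by rwa [hrec] at hj1) (by omega)
        · have : j = i + 1 := by omega
          simpa [this] using hd
      · have hdi' : PySem.Chars.isdigit (r.getD i ' ') = false := by
          unfold pvDig at hdi
          exact eq_false_of_ne_true hdi
        have hrec : pvGoLeft r (i + 1) = i + 1 := by
          simp only [pvGoLeft, hdi', Bool.not_false, if_true]
        rw [hrec]
        refine ⟨le_refl _, ?_, Or.inr (by simpa using hdi')⟩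
        intro j hj1 hj2
        have : j = i + 1 := by omega
        simpa [this] using hd
      
lemma pvGoRight_spec (r : List Char) (x : Nat) : x < r.length → pvDig r x = true →
    x ≤ pvGoRight r x ∧ pvGoRight r x < r.length ∧
      (∀ j, x ≤ j → j ≤ pvGoRight r x → pvDig r j = true) ∧
      (pvGoRight r x + 1 = r.length ∨ pvDig r (pvGoRight r x + 1) = false) := by
  fun_induction pvGoRight r x with
  | case1 i h =>
      intro hx hd
      simp only [Bool.or_eq_true, Bool.not_eq_true', decide_eq_true_eq] at h
      refine ⟨le_refl _, hx, ?_, ?_⟩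
      · intro j h1 h2
        have : j = i := by omega
        simpa [this] using hd
      · rcases h with h | h
        · left; omega
        · right; exact h
  | case2 i h ih =>
      intro hx hd
      simp only [Bool.or_eq_true, Bool.not_eq_true', not_or, decide_eq_true_eq] at h
      have hd2 : pvDig r (i + 1) = true := by
        unfold pvDig
        rcases hb : PySem.Chars.isdigit (r.getD (i + 1) ' ') with _ | _
        · exact absurd hb h.2
        · rfl
      have hlt : i + 1 < r.length := by
        by_contra hc
        rw [pvDig_oob r (i + 1) (by omega)] at hd2
        cases hd2
      obtain ⟨h1, h2, h3, h4⟩ := ih hlt hd2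
      refine ⟨by omega, h2, ?_, h4⟩
      intro j hj1 hj2
      rcases Nat.lt_or_ge j (i + 1) with hlt' | hge
      · have : j = i := by omega
        simpa [this] using hd
      · exact h3 j hge hj2

lemma pvRun_unique (r : List Char) (a b a' b' x : Nat) (h : pvRun r a b) (h' : pvRun r a' b')
    (ha : a ≤ x) (hb : x ≤ b) (ha' : a' ≤ x) (hb' : x ≤ b') : a = a' ∧ b = b' := by
  obtain ⟨hab, hbl, hin, hl, hr⟩ := h
  obtain ⟨hab', hbl', hin', hl', hr'⟩ := h'
  constructor
  · rcases Nat.lt_trichotomy a a' with hlt | heq | hgt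
    · exfalso
      rcases hl' with h0 | hnd
      · omega
      · exact absurd (hin (a' - 1) (by omega) (by omega)) (by simp [hnd])
    · exact heq
    · exfalso
      rcases hl with h0 | hnd
      · omega
      · exact absurd (hin' (a - 1) (by omega) (by omega)) (by simp [hnd])
  · rcases Nat.lt_trichotomy b b' with hlt | heq | hgt
    · exfalso
      rcases hr with h0 | hnd
      · omega
      · exact absurd (hin' (b + 1) (by omega) (by omega)) (by simp [hnd])
    · exact heq
    · exfalso
      rcases hr' with h0 | hnd
      · omega
      · exact absurd (hin (b' + 1) (by omega) (by omega)) (by simp [hnd])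

-- recursive reference form of B's single pass
def pvG (r : List Char) : List Char → Int → Option Int → List (Int × Int)
  | [], _, none => []
  | [], k, some a => [(a, k - 1)]
  | c :: t, k, cur =>
      if PySem.Chars.isdigit c then
        pvG r t (k + 1) (if cur.isNone then some k else cur)
      else
        match cur with
        | some a => (a, k - 1) :: pvG r t (k + 1) none
        | none => pvG r t (k + 1) none

lemma pvFold_eq_pvG (r : List Char) : ∀ (t : List Char) (k : Int) (acc : List (Int × Int)) (cur : Option Int),
    (match ((PySem.List.enumerate t k).foldl pvSpanStep (acc, cur)) with
      | (acc', some a) => acc' ++ [(a, k + t.length - 1)]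
      | (acc', none) => acc') = acc ++ pvG r t k cur := by
  intro t
  induction t with
  | nil =>
      intro k acc cur
      cases cur <;> simp [PySem.List.enumerate_nil, pvG]
  | cons c t ih =>
      intro k acc cur
      rw [PySem.List.enumerate_cons, List.foldl_cons]
      rw [show (k + (((c :: t).length : Nat) : Int) - 1) = (k + 1) + ((t.length : Nat) : Int) - 1 by
        push_cast [List.length_cons]; ring]
      by_cases hc : PySem.Chars.isdigit c
      · cases cur with
        | none =>
            have hstep : pvSpanStep (acc, none) (k, c) = (acc, some k) := by
              simp [pvSpanStep, hc]
            rw [hstep, ih (k + 1) acc (some k)]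
            simp [pvG, hc]
        | some a =>
            have hstep : pvSpanStep (acc, some a) (k, c) = (acc, some a) := by
              simp [pvSpanStep, hc]
            rw [hstep, ih (k + 1) acc (some a)]
            simp [pvG, hc]
      · cases cur with
        | none =>
            have hstep : pvSpanStep (acc, none) (k, c) = (acc, none) := by
              simp [pvSpanStep, hc]
            rw [hstep, ih (k + 1) acc none]
            simp [pvG, hc]
        | some a =>
            have hstep : pvSpanStep (acc, some a) (k, c) = (acc ++ [(a, k - 1)], none) := by
              simp [pvSpanStep, hc]
            rw [hstep, ih (k + 1) (acc ++ [(a, k - 1)]) none]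
            simp [pvG, hc]

lemma pvSpans_eq_pvG (r : List Char) : pvSpans r = pvG r r 0 none := by
  have := pvFold_eq_pvG r r 0 [] none
  unfold pvSpans
  simp only [List.nil_append] at this
  rcases hfold : (PySem.List.enumerate r 0).foldl pvSpanStep ([], none) with ⟨acc', cur'⟩
  rw [hfold] at this
  cases cur' with
  | none => simpa using this
  | some a =>
      simp only [zero_add] at this
      simpa using this

-- state invariant of the pass at position m
def pvC (r : List Char) (m : Nat) : Option Int → Prop
  | none => m = 0 ∨ pvDig r (m - 1) = false
  | some a => ∃ a0 : Nat, a = (a0 : Int) ∧ a0 < m ∧ (∀ j, a0 ≤ j → j < m → pvDig r j = true) ∧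
      (a0 = 0 ∨ pvDig r (a0 - 1) = false)

lemma pvDig_getElem (r : List Char) (m : Nat) (h : m < r.length) :
    pvDig r m = PySem.Chars.isdigit r[m] := by
  unfold pvDig
  rw [List.getD_eq_getElem r ' ' h]

-- unfolded forms and step invariants of pvC
lemma pvC_none_intro (r : List Char) (m : Nat) (h : m = 0 ∨ pvDig r (m - 1) = false) :
    pvC r m none := h

lemma pvC_some_elim (r : List Char) (m : Nat) (a : Int) (hC : pvC r m (some a)) :
    ∃ a0 : Nat, a = (a0 : Int) ∧ a0 < m ∧ (∀ j, a0 ≤ j → j < m → pvDig r j = true) ∧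
      (a0 = 0 ∨ pvDig r (a0 - 1) = false) := hC

lemma pvC_extend (r : List Char) (m : Nat) (a : Int) (hC : pvC r m (some a))
    (hdm : pvDig r m = true) : pvC r (m + 1) (some a) := by
  obtain ⟨a0n, ha0, hlt, hin, hbd⟩ := pvC_some_elim r m a hC
  show ∃ a0 : Nat, a = (a0 : Int) ∧ a0 < m + 1 ∧ (∀ j, a0 ≤ j → j < m + 1 → pvDig r j = true) ∧
      (a0 = 0 ∨ pvDig r (a0 - 1) = false)
  refine ⟨a0n, ha0, by omega, ?_, hbd⟩
  intro j h1 h2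
  rcases Nat.lt_or_ge j m with h | h
  · exact hin j h1 h
  · have hj : j = m := by omega
    rw [hj]; exact hdm

lemma pvC_openNew (r : List Char) (m : Nat) (hC : pvC r m none)
    (hdm : pvDig r m = true) : pvC r (m + 1) (some (m : Int)) := by
  show ∃ a0 : Nat, (m : Int) = (a0 : Int) ∧ a0 < m + 1 ∧
      (∀ j, a0 ≤ j → j < m + 1 → pvDig r j = true) ∧ (a0 = 0 ∨ pvDig r (a0 - 1) = false)
  refine ⟨m, rfl, by omega, ?_, hC⟩
  intro j h1 h2
  have hj : j = m := by omega
  rw [hj]; exact hdm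

lemma pvC_close (r : List Char) (m : Nat) (hdm : pvDig r m = false) : pvC r (m + 1) none := by
  show m + 1 = 0 ∨ pvDig r (m + 1 - 1) = false
  right
  simpa using hdm

-- soundness: every span produced by the pass is a maximal digit run
lemma pvG_sound (r : List Char) : ∀ (n m : Nat) (cur : Option Int), m + n = r.length → pvC r m cur →
    ∀ a b : Int, (a, b) ∈ pvG r (r.drop m) m cur →
      ∃ an bn : Nat, a = (an : Int) ∧ b = (bn : Int) ∧ pvRun r an bn := by
  intro n
  induction n with
  | zero =>
      intro m cur hm hC a b hmem
      rw [List.drop_eq_nil_of_le (by omega)] at hmem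
      cases cur with
      | none => simp [pvG] at hmem
      | some a0 =>
          simp only [pvG, List.mem_singleton, Prod.mk.injEq] at hmem
          obtain ⟨a0n, ha0, hlt, hin, hbd⟩ := pvC_some_elim r m a0 hC
          refine ⟨a0n, m - 1, by rw [hmem.1, ha0], by rw [hmem.2]; omega, ?_⟩
          exact ⟨by omega, by omega, fun j h1 h2 => hin j h1 (by omega), hbd, Or.inl (by omega)⟩
  | succ n ih =>
      intro m cur hm hC a b hmem
      have hmlt : m < r.length := by omega
      rw [List.drop_eq_getElem_cons hmlt] at hmem
      by_cases hc : PySem.Chars.isdigit r[m]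
      · have hdm : pvDig r m = true := by rw [pvDig_getElem r m hmlt]; exact hc
        cases cur with
        | none =>
            simp only [pvG, hc, if_true, Option.isNone_none] at hmem
            exact ih (m + 1) (some (m : Int)) (by omega) (pvC_openNew r m hC hdm) a b
              (by simpa using hmem)
        | some a0 =>
            simp only [pvG, hc, if_true, Option.isNone_some] at hmem
            exact ih (m + 1) (some a0) (by omega) (pvC_extend r m a0 hC hdm) a b
              (by simpa using hmem)
      · have hdm : pvDig r m = false := by rw [pvDig_getElem r m hmlt]; simpa using hc
        cases cur with
        | none =>
            simp only [pvG, hc, Bool.false_eq_true, if_false] at hmem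
            exact ih (m + 1) none (by omega) (pvC_close r m hdm) a b hmem
        | some a0 =>
            simp only [pvG, hc, Bool.false_eq_true, if_false, List.mem_cons, Prod.mk.injEq] at hmem
            rcases hmem with ⟨ha, hb⟩ | hmem
            · obtain ⟨a0n, ha0, hlt, hin, hbd⟩ := pvC_some_elim r m a0 hC
              refine ⟨a0n, m - 1, by rw [ha, ha0], by rw [hb]; omega, ?_⟩
              exact ⟨by omega, by omega, fun j h1 h2 => hin j h1 (by omega), hbd,
                Or.inr (by have hm1 : m - 1 + 1 = m := by omega
                           rw [hm1]; exact hdm)⟩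
            · exact ih (m + 1) none (by omega) (pvC_close r m hdm) a b hmem

-- coverage: a digit position x (at or beyond m, or inside the open run) is covered by some span
lemma pvG_cover (r : List Char) : ∀ (n m : Nat) (cur : Option Int), m + n = r.length → pvC r m cur →
    ∀ x : Nat, x < r.length → pvDig r x = true →
      (m ≤ x ∨ ∃ a0 : Nat, cur = some (a0 : Int) ∧ a0 ≤ x ∧ x < m) →
      ∃ p ∈ pvG r (r.drop m) m cur, p.1 ≤ (x : Int) ∧ (x : Int) ≤ p.2 := by
  intro n
  induction n with
  | zero =>
      intro m cur hm hC x hx hdx hside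
      rw [List.drop_eq_nil_of_le (by omega)]
      rcases hside with h | ⟨a0, hcur, h1, h2⟩
      · omega
      · subst hcur
        refine ⟨((a0 : Int), (m : Int) - 1), by simp [pvG], by push_cast; omega⟩
  | succ n ih =>
      intro m cur hm hC x hx hdx hside
      have hmlt : m < r.length := by omega
      rw [List.drop_eq_getElem_cons hmlt]
      by_cases hc : PySem.Chars.isdigit r[m]
      · have hdm : pvDig r m = true := by rw [pvDig_getElem r m hmlt]; exact hc
        cases cur with
        | none =>
            simp only [pvG, hc, if_true, Option.isNone_none]
            refine ih (m + 1) (some (m : Int)) (by omega) (pvC_openNew r m hC hdm) x hx hdx ?_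
            rcases hside with h | ⟨a0, hcur, _, _⟩
            · rcases Nat.eq_or_lt_of_le h with h | h
              · exact Or.inr ⟨m, rfl, by omega, by omega⟩
              · exact Or.inl h
            · cases hcur
        | some a0 =>
            simp only [pvG, hc, if_true, Option.isNone_some]
            obtain ⟨a0n, ha0, hlt, hin, hbd⟩ := pvC_some_elim r m a0 hC
            refine ih (m + 1) (some a0) (by omega) (pvC_extend r m a0 hC hdm) x hx hdx ?_
            rcases hside with h | ⟨a1, hcur, h1, h2⟩
            · rcases Nat.eq_or_lt_of_le h with h | h
              · exact Or.inr ⟨a0n, by rw [ha0], by omega, by omega⟩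
              · exact Or.inl h
            · rw [ha0] at hcur
              have ha1 : a1 = a0n := by
                have := (Option.some.injEq _ _).mp hcur
                exact_mod_cast this.symm
              exact Or.inr ⟨a0n, by rw [ha0], by omega, by omega⟩
      · have hdm : pvDig r m = false := by rw [pvDig_getElem r m hmlt]; simpa using hc
        have hxm : x ≠ m := fun h => by rw [h] at hdx; rw [hdx] at hdm; cases hdm
        cases cur with
        | none =>
            simp only [pvG, hc, Bool.false_eq_true, if_false]
            refine ih (m + 1) none (by omega) (pvC_close r m hdm) x hx hdx ?_
            rcases hside with h | ⟨a0, hcur, _, _⟩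
            · left; omega
            · cases hcur
        | some a0 =>
            simp only [pvG, hc, Bool.false_eq_true, if_false]
            rcases hside with h | ⟨a1, hcur, h1, h2⟩
            · have hx1 : m + 1 ≤ x := by omega
              obtain ⟨p, hp, hps⟩ := ih (m + 1) none (by omega) (pvC_close r m hdm) x hx hdx
                (Or.inl hx1)
              exact ⟨p, List.mem_cons_of_mem _ hp, hps⟩
            · have ha0' : a0 = (a1 : Int) := by injection hcur with h
              refine ⟨(a0, (m : Int) - 1), List.mem_cons_self .., ?_, ?_⟩
              · show a0 ≤ (x : Int)
                rw [ha0']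
                exact_mod_cast h1
              · show (x : Int) ≤ (m : Int) - 1
                omega

-- the span lookup finds exactly A's (goLeft, goRight) pair
lemma pv_find_spans (r : List Char) (x : Nat) (hx : x < r.length) (hd : pvDig r x = true) :
    (pvSpans r).find? (fun p => decide (p.1 ≤ (x : Int)) && decide ((x : Int) ≤ p.2)) =
      some ((pvGoLeft r x : Int), (pvGoRight r x : Int)) := by
  obtain ⟨hl1, hl2, hl3⟩ := pvGoLeft_spec r x hd
  obtain ⟨hr1, hr2, hr3, hr4⟩ := pvGoRight_spec r x hx hd
  have hrun : pvRun r (pvGoLeft r x) (pvGoRight r x) := by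
    refine ⟨by omega, hr2, ?_, hl3, hr4⟩
    intro j h1 h2
    rcases Nat.le_total j x with h | h
    · exact hl2 j h1 h
    · exact hr3 j h h2
  rw [pvSpans_eq_pvG]
  have hC0 : pvC r 0 none := pvC_none_intro r 0 (Or.inl rfl)
  rcases hfind : (pvG r r 0 none).find? (fun p => decide (p.1 ≤ (x : Int)) && decide ((x : Int) ≤ p.2)) with _ | z
  · exfalso
    obtain ⟨p, hp, hp1, hp2⟩ := pvG_cover r r.length 0 none (by omega) hC0 x hx hd (Or.inl (by omega))
    have := List.find?_eq_none.mp hfind p hp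
    simp [hp1, hp2] at this
  · have hz := List.find?_some hfind
    have hzm := List.mem_of_find?_eq_some hfind
    obtain ⟨an, bn, ha, hb, hrun'⟩ := pvG_sound r r.length 0 none (by omega) hC0 z.1 z.2 (by simpa using hzm)
    simp only [ha, hb, Bool.and_eq_true, decide_eq_true_eq] at hz
    have hax : an ≤ x := by exact_mod_cast hz.1
    have hbx : x ≤ bn := by exact_mod_cast hz.2
    obtain ⟨he1, he2⟩ := pvRun_unique r an bn (pvGoLeft r x) (pvGoRight r x) x hrun' hrun hax hbx (by omega) (by omega)
    have hzeq : z = ((an : Int), (bn : Int)) := Prod.ext ha hb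
    rw [hfind, hzeq, he1, he2]

-- ===== VERDICT (by name: the statement is the Claim_ definition above) =====
theorem get_number_at_spec : Claim_equal_get_number_at := by
  intro s x y _
  unfold Spec_get_number_at get_number_at get_number_at_alt
  by_cases hy : y < 0 || (s.length : Int) ≤ y
  · simp [hy]
  · simp only [hy, Bool.false_eq_true, if_false]
    set row := ((PySem.List.pyGet? s y).getD "").toList with hrow
    by_cases hxg : x < 0 || (row.length : Int) ≤ x
    · simp [hxg]
    · simp only [hxg, Bool.false_eq_true, if_false]
      simp only [Bool.or_eq_true, not_or, decide_eq_true_eq] at hxg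
      obtain ⟨hxg1, hxg2⟩ := hxg
      have hx0 : 0 ≤ x := by omega
      have hxl : x.toNat < row.length := by omega
      have hxi : x = ((x.toNat : Nat) : Int) := by omega
      by_cases hd : PySem.Chars.isdigit (PySem.List.pyGetD row x ' ')
      · simp only [hd, Bool.not_true, Bool.false_eq_true, if_false]
        have hdig : pvDig row x.toNat = true := by
          unfold pvDig
          rw [hxi, PySem.List.pyGetD_natCast] at hd
          exact hd
        rw [hxi, pv_find_spans row x.toNat hxl hdig]
        simp [max_eq_left hx0]
      · simp [hd]
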